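-- pv_equiv track=rewrite | github.com/aleksandr-kramer/mojo_reports | src/reports/coordinator_weekly_report.py | make_per_slide_mappings
-- ===== SOURCE A (Python) =====
-- from typing import Dict, List, Optional, Tuple
--
-- def chunk(lst: List, size: int) -> List[List]:
--     return [lst[i : i + size] for i in range(0, len(lst), size)]
--
-- def make_per_slide_mappings(
--     header: Dict[str, str], rows: List[Tuple[str, str, str]], per_slide_max: int
-- ) -> List[Dict[str, Optional[str]]]:
--     mappings = []
--     for pack in chunk(rows, per_slide_max) or [[]]:
--         m = dict(header)
--         for idx in range(1, per_slide_max + 1):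
--             if idx <= len(pack):
--                 teacher, b, c = pack[idx - 1]
--                 m[f"teacher_{idx}"] = teacher
--                 m[f"B{idx}"] = b
--                 m[f"C{idx}"] = c
--             else:
--                 m[f"teacher_{idx}"] = None
--                 m[f"B{idx}"] = None
--                 m[f"C{idx}"] = None
--         mappings.append(m)
--     return mappings
-- ===== SOURCE B (Python) =====
-- def _set_slot(m, idx, teacher, b, c):
--     m[f"teacher_{idx}"] = teacher
--     m[f"B{idx}"] = b
--     m[f"C{idx}"] = c
--
-- def make_per_slide_mappings(header, rows, per_slide_max):
--     # Stream the rows once with an accumulator, flushing a slide whenever it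
--     # fills; no chunking pass. Non-positive per_slide_max has no slots at all.
--     if per_slide_max <= 0:
--         return [dict(header)]
--     mappings = []
--     m, idx = dict(header), 0
--     for teacher, b, c in rows:
--         idx += 1
--         _set_slot(m, idx, teacher, b, c)
--         if idx == per_slide_max:
--             mappings.append(m)
--             m, idx = dict(header), 0
--     if idx > 0 or not mappings:
--         for j in range(idx + 1, per_slide_max + 1):
--             _set_slot(m, j, None, None, None)
--         mappings.append(m)
--     return mappings
-- ===== Notes on version B (the rewrite author's own statement) =====
-- stated objective: alternative
-- what changed: Replaces A's chunk-the-rows-then-fill-each-chunk two-stage design with a single streaming pass over the rows that fills slots into an accumulator dict and flushes a slide whenever it fills, padding only the final slide.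
import Mathlib
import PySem

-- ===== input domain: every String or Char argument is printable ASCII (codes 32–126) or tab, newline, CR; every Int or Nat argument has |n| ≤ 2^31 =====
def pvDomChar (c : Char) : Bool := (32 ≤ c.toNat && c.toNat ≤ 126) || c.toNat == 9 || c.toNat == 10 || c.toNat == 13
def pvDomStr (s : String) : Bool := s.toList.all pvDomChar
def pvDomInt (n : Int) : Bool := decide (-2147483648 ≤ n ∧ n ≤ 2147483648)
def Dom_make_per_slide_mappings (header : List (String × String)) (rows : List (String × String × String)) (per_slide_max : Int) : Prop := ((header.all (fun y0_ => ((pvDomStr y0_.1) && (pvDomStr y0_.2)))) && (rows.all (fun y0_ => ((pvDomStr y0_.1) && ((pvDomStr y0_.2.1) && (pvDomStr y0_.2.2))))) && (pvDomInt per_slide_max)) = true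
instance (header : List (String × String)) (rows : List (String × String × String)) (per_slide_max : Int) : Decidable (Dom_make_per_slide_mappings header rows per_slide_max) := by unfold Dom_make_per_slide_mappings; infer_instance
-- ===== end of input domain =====

-- B replaces A's chunk-then-fill pass by a single streaming pass over the rows
-- with a flush-on-full accumulator (objective: alternative, same cost).


-- ===== PORT A =====
-- chunk(lst, size) = [lst[i:i+size] for i in range(0, len(lst), size)]
def chunkA (lst : List (String × String × String)) (size : Int) : List (List (String × String × String)) :=
  (PySem.List.pyRange 0 (lst.length : Int) size).map
    (fun i => PySem.List.slice lst (some i) (some (i + size)))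

-- the body of A's inner `for idx in range(1, per_slide_max+1)` loop (verbatim);
-- pack[idx-1] is guarded by idx <= len(pack), so pyGetD's default is unreachable.
def slideBodyA (pack : List (String × String × String))
    (m : PySem.Dict String (Option String)) (idx : Int) : PySem.Dict String (Option String) :=
  if idx ≤ (pack.length : Int) then
    let r := PySem.List.pyGetD pack (idx - 1) ("", "", "")
    ((m.insert ("teacher_" ++ PySem.Int.toStr idx) (some r.1)).insert
      ("B" ++ PySem.Int.toStr idx) (some r.2.1)).insert
      ("C" ++ PySem.Int.toStr idx) (some r.2.2)
  else
    ((m.insert ("teacher_" ++ PySem.Int.toStr idx) none).insert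
      ("B" ++ PySem.Int.toStr idx) none).insert
      ("C" ++ PySem.Int.toStr idx) none

-- the body of A's outer loop: one slide dict (header values enter as `some`).
def slideA (header : List (String × String)) (per_slide_max : Int)
    (pack : List (String × String × String)) : List (String × Option String) :=
  ((PySem.List.pyRange 1 (per_slide_max + 1) 1).foldl (slideBodyA pack)
    (PySem.Dict.ofList (header.map (fun kv => (kv.1, some kv.2))))).items

def make_per_slide_mappings (header : List (String × String)) (rows : List (String × String × String)) (per_slide_max : Int) : List (List (String × Option String)) :=
  let cs := chunkA rows per_slide_max
  (if cs.isEmpty then [[]] else cs).map (slideA header per_slide_max)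

-- ===== PORT B =====
-- _set_slot(m, idx, teacher, b, c)
def setSlot (m : PySem.Dict String (Option String)) (idx : Int)
    (t b c : Option String) : PySem.Dict String (Option String) :=
  ((m.insert ("teacher_" ++ PySem.Int.toStr idx) t).insert
    ("B" ++ PySem.Int.toStr idx) b).insert ("C" ++ PySem.Int.toStr idx) c

-- dict(header) (values enter as `some`)
def headerDict (header : List (String × String)) : PySem.Dict String (Option String) :=
  PySem.Dict.ofList (header.map (fun kv => (kv.1, some kv.2)))

-- the body of B's streaming `for teacher, b, c in rows` loop: state =
-- (mappings, current dict m, idx); a full slide is flushed as its items.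
def stepB (n : Int) (hd : PySem.Dict String (Option String))
    (st : List (List (String × Option String)) × PySem.Dict String (Option String) × Int)
    (r : String × String × String) :
    List (List (String × Option String)) × PySem.Dict String (Option String) × Int :=
  let idx := st.2.2 + 1
  let m := setSlot st.2.1 idx (some r.1) (some r.2.1) (some r.2.2)
  if idx = n then (st.1 ++ [m.items], hd, 0) else (st.1, m, idx)

-- B's trailing `for j in range(idx+1, per_slide_max+1)` padding loop
def padB (n : Int) (m : PySem.Dict String (Option String)) (idx : Int) :
    PySem.Dict String (Option String) :=
  (PySem.List.pyRange (idx + 1) (n + 1) 1).foldl (fun m j => setSlot m j none none none) m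

def make_per_slide_mappings_alt (header : List (String × String)) (rows : List (String × String × String)) (per_slide_max : Int) : List (List (String × Option String)) :=
  if per_slide_max ≤ 0 then [(headerDict header).items]
  else
    let hd := headerDict header
    let st := rows.foldl (stepB per_slide_max hd) ([], hd, 0)
    if 0 < st.2.2 ∨ st.1 = [] then st.1 ++ [(padB per_slide_max st.2.1 st.2.2).items]
    else st.1

-- ===== PRECONDITION & SPEC =====
-- Pre_ excludes only per_slide_max = 0, where A's range(0, len(rows), 0) raises ValueError.
def Pre_make_per_slide_mappings (header : List (String × String)) (rows : List (String × String × String)) (per_slide_max : Int) : Prop := per_slide_max ≠ 0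
instance (header : List (String × String)) (rows : List (String × String × String)) (per_slide_max : Int) : Decidable (Pre_make_per_slide_mappings header rows per_slide_max) := by unfold Pre_make_per_slide_mappings; infer_instance

def pvWitness_make_per_slide_mappings : (List (String × String)) × (List (String × String × String)) × Int :=
  ([("title", "W1")], [("Ann", "b1", "c1"), ("Bob", "b2", "c2"), ("Cy", "b3", "c3")], 2)

def Spec_make_per_slide_mappings (header : List (String × String)) (rows : List (String × String × String)) (per_slide_max : Int) (out : List (List (String × Option String))) : Prop := out = make_per_slide_mappings_alt header rows per_slide_max
instance (header : List (String × String)) (rows : List (String × String × String)) (per_slide_max : Int) (out : List (List (String × Option String))) : Decidable (Spec_make_per_slide_mappings header rows per_slide_max out) := by unfold Spec_make_per_slide_mappings; infer_instance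

-- ===== CLAIM (what is proved, stated in full; the proofs are below) =====
def Claim_equal_make_per_slide_mappings : Prop := ∀ (header : List (String × String)) (rows : List (String × String × String)) (per_slide_max : Int), Dom_make_per_slide_mappings header rows per_slide_max → Pre_make_per_slide_mappings header rows per_slide_max → Spec_make_per_slide_mappings header rows per_slide_max (make_per_slide_mappings header rows per_slide_max)

-- ===== LEMMAS AND PROOFS =====

-- fillFrom m idx l : the current dict after streaming the rows of l into m,
-- the first one at slot idx+1 (the shape B's loop builds while not flushing).
def fillFrom (m : PySem.Dict String (Option String)) (idx : Int) :
    List (String × String × String) → PySem.Dict String (Option String)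
  | [] => m
  | r :: t => fillFrom (setSlot m (idx + 1) (some r.1) (some r.2.1) (some r.2.2)) (idx + 1) t

theorem slice_drop_shift (xs : List (String × String × String)) (d : Nat) {a b : Int}
    (ha : 0 ≤ a) (hb : 0 ≤ b) :
    PySem.List.slice (xs.drop d) (some a) (some b) =
      PySem.List.slice xs (some (a + d)) (some (b + d)) := by
  rw [PySem.List.slice_toNat _ ha hb,
      PySem.List.slice_toNat _ (by omega : (0:Int) ≤ a + d) (by omega : (0:Int) ≤ b + d)]
  rw [List.drop_drop]
  congr 1
  · omega
  · congr 1; omega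

theorem chunkA_nil {s : Int} : chunkA [] s = [] := by
  simp [chunkA, PySem.List.pyRange]

theorem chunkA_cons {lst : List (String × String × String)} {s : Int}
    (hs : 0 < s) (hne : lst ≠ []) :
    chunkA lst s = lst.take s.toNat :: chunkA (lst.drop s.toNat) s := by
  have hL : 0 < lst.length := List.length_pos_iff.mpr hne
  have hLi : (0:Int) < lst.length := by exact_mod_cast hL
  have hsnn : (s.toNat : Int) = s := Int.toNat_of_nonneg (le_of_lt hs)
  unfold chunkA
  rw [PySem.List.pyRange_of_pos _ _ hs, PySem.List.pyRange_of_pos _ _ hs]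
  have hq0 : 0 ≤ ((lst.length : Int) - 1) / s := Int.ediv_nonneg (by omega) (le_of_lt hs)
  have hsplit : (lst.length : Int) - 0 + s - 1 = ((lst.length : Int) - 1) + 1 * s := by ring
  have hcount : (if (0:Int) < lst.length then ((((lst.length : Int)) - 0 + s - 1) / s).toNat else 0)
      = (((lst.length : Int) - 1) / s).toNat + 1 := by
    rw [if_pos hLi, hsplit, Int.add_mul_ediv_right _ _ (by omega : s ≠ 0)]
    omega
  have hlen' : ((lst.drop s.toNat).length : Int) = (lst.length : Int) - min s (lst.length : Int) := by
    simp [List.length_drop]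
    omega
  have hcount' : (if (0:Int) < (lst.drop s.toNat).length then
        (((((lst.drop s.toNat).length : Int)) - 0 + s - 1) / s).toNat else 0)
      = (((lst.length : Int) - 1) / s).toNat := by
    by_cases hcase : (lst.length : Int) ≤ s
    · have hz : ¬ ((0:Int) < (lst.drop s.toNat).length) := by omega
      rw [if_neg hz]
      have : ((lst.length : Int) - 1) / s = 0 :=
        Int.ediv_eq_zero_of_lt (by omega) (by omega)
      omega
    · have hmin : min s (lst.length : Int) = s := by omega
      have hpos : (0:Int) < (lst.drop s.toNat).length := by omega
      rw [if_pos hpos, hlen', hmin]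
      have : (lst.length : Int) - s - 0 + s - 1 = ((lst.length : Int) - 1) := by ring
      rw [this]
  rw [hcount, hcount', List.range_succ_eq_map]
  simp only [List.map_cons, List.map_map]
  congr 1
  · norm_num
    exact PySem.List.slice_to _ (le_of_lt hs)
  · apply List.map_congr_left
    intro k _
    simp only [Function.comp_apply]
    have hknn : (0:Int) ≤ s * (k:Int) := by positivity
    symm
    rw [slice_drop_shift _ _ (by omega) (by omega), hsnn]
    congr 2
    · push_cast; ring
    · push_cast; ring

-- streaming a list that does not fill the slide: no flush, slots accumulate
theorem stream_noflush {n : Int} (hd : PySem.Dict String (Option String)) :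
    ∀ (l : List (String × String × String)) (m : PySem.Dict String (Option String))
      (idx : Int) (acc : List (List (String × Option String))),
      0 ≤ idx → idx + (l.length : Int) < n →
      l.foldl (stepB n hd) (acc, m, idx) = (acc, fillFrom m idx l, idx + l.length) := by
  intro l
  induction l with
  | nil => intro m idx acc _ _; simp [fillFrom]
  | cons r t ih =>
    intro m idx acc h0 hlt
    have hlen : ((r :: t).length : Int) = (t.length : Int) + 1 := by
      simp only [List.length_cons]; push_cast; ring
    rw [List.foldl_cons]
    have hne : ¬ (idx + 1 = n) := by omega
    show t.foldl (stepB n hd) (stepB n hd (acc, m, idx) r) = _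
    rw [show stepB n hd (acc, m, idx) r
        = (acc, setSlot m (idx + 1) (some r.1) (some r.2.1) (some r.2.2), idx + 1) by
      simp [stepB, hne]]
    rw [ih _ _ _ (by omega) (by omega)]
    simp only [fillFrom, List.length_cons]
    congr 2
    push_cast; ring

-- streaming a list that exactly fills the slide: it is flushed, state resets
theorem stream_flush {n : Int} (hd : PySem.Dict String (Option String)) :
    ∀ (l : List (String × String × String)) (m : PySem.Dict String (Option String))
      (idx : Int) (acc : List (List (String × Option String))),
      0 ≤ idx → l ≠ [] → idx + (l.length : Int) = n →
      l.foldl (stepB n hd) (acc, m, idx) = (acc ++ [(fillFrom m idx l).items], hd, 0) := by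
  intro l
  induction l with
  | nil => intro _ _ _ _ hne _; exact absurd rfl hne
  | cons r t ih =>
    intro m idx acc h0 _ heq
    rw [List.foldl_cons]
    cases t with
    | nil =>
      have hn : idx + 1 = n := by simpa using heq
      show [].foldl (stepB n hd) (stepB n hd (acc, m, idx) r) = _
      simp [stepB, hn, fillFrom]
    | cons r' t' =>
      have hne : ¬ (idx + 1 = n) := by
        simp only [List.length_cons] at heq; push_cast at heq; omega
      show (r' :: t').foldl (stepB n hd) (stepB n hd (acc, m, idx) r) = _
      rw [show stepB n hd (acc, m, idx) r
          = (acc, setSlot m (idx + 1) (some r.1) (some r.2.1) (some r.2.2), idx + 1) by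
        simp [stepB, hne]]
      rw [ih _ _ _ (by omega) (by simp) (by
        simp only [List.length_cons] at heq ⊢; push_cast at heq ⊢; omega)]
      simp [fillFrom]

-- A's loop over the occupied prefix of slot indices equals fillFrom
theorem slide_prefix_eq_fillFrom (pack : List (String × String × String)) :
    ∀ (j k : Nat) (m : PySem.Dict String (Option String)), pack.length = k + j →
      (PySem.List.pyRange ((k : Int) + 1) ((pack.length : Int) + 1) 1).foldl
        (slideBodyA pack) m = fillFrom m k (pack.drop k) := by
  intro j
  induction j with
  | zero =>
    intro k m hk
    rw [PySem.List.pyRange_one_eq_nil (by omega), List.foldl_nil,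
        List.drop_of_length_le (by omega : pack.length ≤ k)]
    rfl
  | succ j ih =>
    intro k m hk
    have hklt : k < pack.length := by omega
    rw [PySem.List.pyRange_one_cons (by push_cast; omega)]
    rw [List.foldl_cons]
    have hbody : slideBodyA pack m ((k : Int) + 1)
        = setSlot m ((k : Int) + 1) (some (pack[k]'hklt).1) (some (pack[k]'hklt).2.1)
            (some (pack[k]'hklt).2.2) := by
      unfold slideBodyA setSlot
      rw [if_pos (by push_cast; omega)]
      have : PySem.List.pyGetD pack ((k : Int) + 1 - 1) ("", "", "") = pack[k]'hklt := by
        have h1 : (k : Int) + 1 - 1 = (k : Int) := by ring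
        rw [h1, PySem.List.pyGetD_natCast, List.getD_eq_getElem _ _ hklt]
      rw [this]
    rw [hbody]
    have ihk := ih (k + 1) (setSlot m ((k : Int) + 1) (some (pack[k]'hklt).1)
      (some (pack[k]'hklt).2.1) (some (pack[k]'hklt).2.2)) (by omega)
    rw [show (((k + 1 : Nat)) : Int) + 1 = (k : Int) + 1 + 1 by push_cast; ring] at ihk
    rw [ihk]
    have hdrop : pack.drop k = pack[k]'hklt :: pack.drop (k + 1) :=
      (List.cons_getElem_drop_succ (h := hklt)).symm
    rw [hdrop]
    simp only [fillFrom]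
    norm_num

-- A's one-slide dict equals B's fill-then-pad dict, for any pack that fits
theorem slideA_eq_fill_pad (header : List (String × String)) {n : Int} (hn : 0 < n)
    (pack : List (String × String × String)) (hlen : (pack.length : Int) ≤ n) :
    slideA header n pack =
      (padB n (fillFrom (headerDict header) 0 pack) (pack.length : Int)).items := by
  unfold slideA padB
  rw [PySem.List.pyRange_one_append 1 ((pack.length : Int) + 1) (n + 1)
      (by omega) (by omega)]
  rw [List.foldl_append]
  have hpre := slide_prefix_eq_fillFrom pack pack.length 0
    (headerDict header) (by omega)
  rw [show ((0 : Nat) : Int) + 1 = (1 : Int) by norm_num] at hpre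
  rw [show (headerDict header) =
    PySem.Dict.ofList (header.map (fun kv => (kv.1, some kv.2))) from rfl] at hpre
  rw [hpre, List.drop_zero]
  congr 1
  apply PySem.List.foldl_congr_mem
  intro acc j hj
  have hjr := PySem.List.mem_pyRange_one.mp hj
  unfold slideBodyA setSlot
  rw [if_neg (by omega)]

-- the streaming loop + final padding equals map slideA over chunkA, for acc ≠ []
theorem stream_eq_chunks (header : List (String × String)) {n : Int} (hn : 0 < n) :
    ∀ (fuel : Nat) (rows : List (String × String × String))
      (acc : List (List (String × Option String))), rows.length ≤ fuel → acc ≠ [] →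
      (let st := rows.foldl (stepB n (headerDict header)) (acc, headerDict header, 0);
       if 0 < st.2.2 ∨ st.1 = [] then st.1 ++ [(padB n st.2.1 st.2.2).items] else st.1)
      = acc ++ (chunkA rows n).map (slideA header n) := by
  intro fuel
  induction fuel with
  | zero =>
    intro rows acc hlen hacc
    have : rows = [] := List.length_eq_zero_iff.mp (Nat.le_zero.mp hlen)
    subst this
    simp [chunkA_nil, hacc]
  | succ f ih =>
    intro rows acc hlen hacc
    by_cases hre : rows = []
    · subst hre; simp [chunkA_nil, hacc]
    · have hL : 0 < rows.length := List.length_pos_iff.mpr hre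
      by_cases hlt : (rows.length : Int) < n
      · -- one partial chunk
        rw [chunkA_cons hn hre]
        have hdropnil : rows.drop n.toNat = [] :=
          List.drop_of_length_le (by omega)
        have htake : rows.take n.toNat = rows :=
          List.take_of_length_le (by omega)
        rw [hdropnil, chunkA_nil, htake]
        rw [stream_noflush _ rows _ 0 acc le_rfl (by omega)]
        simp only [List.map_cons, List.map_nil]
        rw [if_pos (Or.inl (by show (0:Int) < 0 + (rows.length : Int); omega))]
        rw [slideA_eq_fill_pad header hn rows (by omega)]
        simp
      · -- a full chunk, then recurse
        have hnle : n ≤ (rows.length : Int) := by omega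
        have htd := (List.take_append_drop n.toNat rows).symm
        rw [chunkA_cons hn hre]
        conv_lhs => rw [htd]
        rw [List.foldl_append]
        have htlen : ((rows.take n.toNat).length : Int) = n := by
          simp [List.length_take]
          omega
        rw [stream_flush _ (rows.take n.toNat) _ 0 acc le_rfl
          (by intro h; rw [h] at htlen; simp at htlen; omega) (by omega)]
        have hitems : (fillFrom (headerDict header) 0 (rows.take n.toNat)).items
            = slideA header n (rows.take n.toNat) := by
          rw [slideA_eq_fill_pad header hn _ (le_of_eq htlen)]
          unfold padB
          rw [htlen, PySem.List.pyRange_one_eq_nil (le_refl (n + 1))]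
          rfl
        rw [hitems]
        rw [ih (rows.drop n.toNat) (acc ++ [slideA header n (rows.take n.toNat)])
          (by simp only [List.length_drop]; omega) (by simp)]
        simp

-- the n < 0 case: A makes one slide with no slots; B returns [dict(header)]
theorem neg_case (header : List (String × String)) (rows : List (String × String × String))
    {n : Int} (hn : n < 0) :
    make_per_slide_mappings header rows n = make_per_slide_mappings_alt header rows n := by
  have hchunk : chunkA rows n = [] := by
    unfold chunkA
    have hr : PySem.List.pyRange 0 (rows.length : Int) n = [] := by
      unfold PySem.List.pyRange
      rw [if_neg (by omega : ¬ n = 0)]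
      have h1 : ¬ (0:Int) < n := by omega
      have h2 : ¬ ((rows.length : Int) < 0) := by
        have := Int.natCast_nonneg rows.length; omega
      simp [h1, h2]
    rw [hr]; rfl
  unfold make_per_slide_mappings make_per_slide_mappings_alt
  simp only [hchunk, List.isEmpty_nil, if_true, List.map_cons, List.map_nil,
    if_pos (by omega : n ≤ 0)]
  unfold slideA
  rw [PySem.List.pyRange_one_eq_nil (by omega : n + 1 ≤ 1)]
  rfl

-- ===== VERDICT (by name: the statement is the Claim_ definition above) =====
theorem make_per_slide_mappings_spec : Claim_equal_make_per_slide_mappings := by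
  intro header rows n _ hpre
  unfold Spec_make_per_slide_mappings
  rcases lt_trichotomy n 0 with h | h | h
  · exact neg_case header rows h
  · exact absurd h hpre
  · unfold make_per_slide_mappings make_per_slide_mappings_alt
    rw [if_neg (by omega : ¬ n ≤ 0)]
    by_cases hre : rows = []
    · subst hre
      simp only [chunkA_nil, List.isEmpty_nil, if_true, List.map_cons, List.map_nil,
        List.foldl_nil]
      rw [if_pos (Or.inr trivial)]
      rw [show slideA header n ([] : List (String × String × String))
          = (padB n (fillFrom (headerDict header) 0 []) ((0 : Nat) : Int)).items from
        slideA_eq_fill_pad header h [] (by simp; omega)]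
      simp [fillFrom]
    · have hcs : ¬ (chunkA rows n).isEmpty := by
        rw [chunkA_cons h hre]; simp
      simp only [hcs, if_false, Bool.false_eq_true]
      by_cases hlt : (rows.length : Int) < n
      · -- single partial slide
        have hL : 0 < rows.length := List.length_pos_iff.mpr hre
        rw [chunkA_cons h hre, List.drop_of_length_le (by omega), chunkA_nil,
          List.take_of_length_le (by omega)]
        rw [stream_noflush _ rows _ 0 [] le_rfl (by omega)]
        simp only [List.map_cons, List.map_nil]
        rw [if_pos (Or.inl (by show (0:Int) < 0 + (rows.length : Int); omega))]
        rw [slideA_eq_fill_pad header h rows (by omega)]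
        norm_num
      · -- full first slide, then the streaming lemma
        have htd := (List.take_append_drop n.toNat rows).symm
        rw [chunkA_cons h hre]
        conv_rhs => rw [htd]
        rw [List.foldl_append]
        have htlen : ((rows.take n.toNat).length : Int) = n := by
          simp [List.length_take]
          omega
        rw [stream_flush _ (rows.take n.toNat) _ 0 [] le_rfl
          (by intro hh; rw [hh] at htlen; simp at htlen; omega) (by omega)]
        have hitems : (fillFrom (headerDict header) 0 (rows.take n.toNat)).items
            = slideA header n (rows.take n.toNat) := by
          rw [slideA_eq_fill_pad header h _ (le_of_eq htlen)]
          unfold padB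
          rw [htlen, PySem.List.pyRange_one_eq_nil (le_refl (n + 1))]
          rfl
        rw [hitems]
        have hL : 0 < rows.length := List.length_pos_iff.mpr hre
        rw [stream_eq_chunks header h rows.length (rows.drop n.toNat)
          ([] ++ [slideA header n (rows.take n.toNat)])
          (by simp only [List.length_drop]; omega) (by simp)]
        simp
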